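-- pv_equiv track=rewrite | github.com/aime-n/advent_of_code | day3.py | gamma_epsilon
-- ===== SOURCE A (Python) =====
-- def gamma_epsilon(values):
--     gamma, epsilon = '', ''
--     for i in values:
--         if i == 0:
--             gamma += '0'
--             epsilon += '1'
--         else:
--             gamma += '1'
--             epsilon += '0'
--     return int(gamma, 2), int(epsilon, 2)
-- ===== SOURCE B (Python) =====
-- def gamma_epsilon(values):
--     g = 0
--     for i in values:
--         g = 2 * g + (0 if i == 0 else 1)
--     return g, (2 ** len(values)) - 1 - g
-- ===== Notes on version B (the rewrite author's own statement) =====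
-- stated objective: simpler
-- what changed: B accumulates gamma directly as an integer in one pass and derives epsilon arithmetically as the bitwise complement (2**n - 1 - gamma), instead of building two bit strings and parsing each with int(s, 2).
-- crash fix: On the empty list A raises ValueError (int('', 2)) while B returns (0, 0). — e.g. on gamma_epsilon([]): A raises ValueError, B returns (0, 0)
import Mathlib
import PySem

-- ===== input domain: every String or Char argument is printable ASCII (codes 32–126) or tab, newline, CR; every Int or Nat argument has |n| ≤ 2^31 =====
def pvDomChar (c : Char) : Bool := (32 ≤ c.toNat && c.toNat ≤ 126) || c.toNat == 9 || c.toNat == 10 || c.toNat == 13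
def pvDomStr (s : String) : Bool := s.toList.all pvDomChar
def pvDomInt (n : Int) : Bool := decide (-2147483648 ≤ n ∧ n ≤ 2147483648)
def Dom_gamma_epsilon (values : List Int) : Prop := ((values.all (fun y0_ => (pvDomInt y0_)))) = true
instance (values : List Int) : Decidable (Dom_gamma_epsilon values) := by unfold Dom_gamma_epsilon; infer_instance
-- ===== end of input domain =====

-- B replaces A's two bit strings + int(s,2) parsing by one integer accumulator and an
-- arithmetic complement (2^n - 1 - gamma); objective: simpler. A raises ValueError on the
-- empty list (int('', 2)), excluded by Pre_; B returns (0, 0) there (Raises_ block).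

-- ===== PORT A =====
-- hand port of int(s, 2): exact for nonempty strings of '0'/'1' characters, which is the
-- only way A calls it inside Pre_ (Python raises on the empty string, excluded by Pre_).
def pvIntBin (s : List Char) : Int :=
  s.foldl (fun a c => 2 * a + (if c = '1' then 1 else 0)) 0

def gamma_epsilon (values : List Int) : Int × Int :=
  let p := values.foldl
    (fun (p : List Char × List Char) i =>
      if i = 0 then (p.1 ++ ['0'], p.2 ++ ['1']) else (p.1 ++ ['1'], p.2 ++ ['0']))
    ([], [])
  (pvIntBin p.1, pvIntBin p.2)

-- ===== PORT B =====
def gamma_epsilon_alt (values : List Int) : Int × Int :=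
  let g := values.foldl (fun a i => 2 * a + (if i = 0 then 0 else 1)) 0
  (g, (2 : Int) ^ values.length - 1 - g)

-- ===== PRECONDITION & SPEC =====
-- Pre_ excludes only the empty list, on which Python A raises ValueError (int('', 2)).
def Pre_gamma_epsilon (values : List Int) : Prop := values ≠ []
instance (values : List Int) : Decidable (Pre_gamma_epsilon values) := by
  unfold Pre_gamma_epsilon; infer_instance
def pvWitness_gamma_epsilon : List Int := [1, 0, 1]

-- On the empty list A raises ValueError (int('', 2)) while B returns (0, 0).
def Raises_gamma_epsilon (values : List Int) : Prop := values = []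
instance (values : List Int) : Decidable (Raises_gamma_epsilon values) := by
  unfold Raises_gamma_epsilon; infer_instance
def pvRaiseWitness_gamma_epsilon : List Int := []
def pvRaiseWitnessOut_gamma_epsilon : Int × Int := (0, 0)

def Spec_gamma_epsilon (values : List Int) (out : Int × Int) : Prop := out = gamma_epsilon_alt values
instance (values : List Int) (out : Int × Int) : Decidable (Spec_gamma_epsilon values out) := by unfold Spec_gamma_epsilon; infer_instance

-- ===== CLAIM (what is proved, stated in full; the proofs are below) =====
def Claim_equal_gamma_epsilon : Prop := ∀ (values : List Int), Dom_gamma_epsilon values → Pre_gamma_epsilon values → Spec_gamma_epsilon values (gamma_epsilon values)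
def Claim_raises_gamma_epsilon : Prop := (∀ (values : List Int), Dom_gamma_epsilon values → Raises_gamma_epsilon values → ¬ Pre_gamma_epsilon values) ∧ (Dom_gamma_epsilon (pvRaiseWitness_gamma_epsilon) ∧ Raises_gamma_epsilon (pvRaiseWitness_gamma_epsilon) ∧ gamma_epsilon_alt (pvRaiseWitness_gamma_epsilon) = pvRaiseWitnessOut_gamma_epsilon)

-- ===== LEMMAS AND PROOFS =====

-- A's fold over the pair of strings just appends one mapped character per element.
theorem pvA_fold_chars (values : List Int) (gs es : List Char) :
    values.foldl
      (fun (p : List Char × List Char) i =>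
        if i = 0 then (p.1 ++ ['0'], p.2 ++ ['1']) else (p.1 ++ ['1'], p.2 ++ ['0']))
      (gs, es)
    = (gs ++ values.map (fun i => if i = 0 then '0' else '1'),
       es ++ values.map (fun i => if i = 0 then '1' else '0')) := by
  induction values generalizing gs es with
  | nil => simp
  | cons x xs ih =>
    by_cases hx : x = 0 <;> simp [hx, ih, List.foldl_cons]

-- parsing the mapped gamma string = B's integer fold (any accumulator).
theorem pvIntBin_gamma (values : List Int) (a : Int) :
    (values.map (fun i => if i = 0 then '0' else '1')).foldl
      (fun a c => 2 * a + (if c = '1' then 1 else 0)) a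
    = values.foldl (fun a i => 2 * a + (if i = 0 then 0 else 1)) a := by
  induction values generalizing a with
  | nil => rfl
  | cons x xs ih =>
    by_cases hx : x = 0 <;> simp [hx, ih, List.foldl_cons]

-- the two integer folds (gamma and its complement bits) sum to (g+e+1)·2^n − 1.
theorem pvSum_fold (values : List Int) (g e : Int) :
    values.foldl (fun a i => 2 * a + (if i = 0 then 0 else 1)) g
      + (values.map (fun i => if i = 0 then '1' else '0')).foldl
          (fun a c => 2 * a + (if c = '1' then 1 else 0)) e
    = (g + e + 1) * 2 ^ values.length - 1 := by
  induction values generalizing g e with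
  | nil =>
    simp only [List.foldl_nil, List.map_nil, List.length_nil, pow_zero]
    ring
  | cons x xs ih =>
    simp only [List.map_cons, List.foldl_cons, List.length_cons]
    rw [ih]
    by_cases hx : x = 0
    · rw [if_pos hx, if_pos hx, if_pos (show ('1' : Char) = '1' from rfl)]
      ring
    · rw [if_neg hx, if_neg hx, if_neg (show ('0' : Char) ≠ '1' by decide)]
      ring

-- ===== VERDICT (by name: the statement is the Claim_ definition above) =====
theorem gamma_epsilon_spec : Claim_equal_gamma_epsilon := by
  intro values _ _
  unfold Spec_gamma_epsilon gamma_epsilon gamma_epsilon_alt pvIntBin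
  rw [pvA_fold_chars]
  simp only [List.nil_append]
  rw [pvIntBin_gamma]
  have h := pvSum_fold values 0 0
  rw [Prod.mk.injEq]
  exact ⟨rfl, by omega⟩

@[simp] theorem gamma_epsilon_raises : Claim_raises_gamma_epsilon := by
  unfold Claim_raises_gamma_epsilon
  exact ⟨fun v _ hr hp => hp hr, by decide⟩
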